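-- pv_equiv track=rewrite | github.com/IvanDobrovolsky/crimeaisukraine | pipelines/media/scan_pilot.py | get_domain_country
-- ===== SOURCE A (Python) =====
-- TLD_COUNTRY = {
--     'ru': 'Russia', 'su': 'Russia', 'ua': 'Ukraine', 'by': 'Belarus',
--     'de': 'Germany', 'fr': 'France', 'it': 'Italy', 'es': 'Spain',
--     'uk': 'UK', 'co.uk': 'UK', 'pl': 'Poland', 'cz': 'Czechia',
--     'nl': 'Netherlands', 'tr': 'Turkey', 'cn': 'China', 'jp': 'Japan',
--     'kr': 'South Korea', 'in': 'India', 'br': 'Brazil', 'ae': 'UAE',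
--     'il': 'Israel', 'ge': 'Georgia', 'kz': 'Kazakhstan', 'md': 'Moldova',
--     'lv': 'Latvia', 'lt': 'Lithuania', 'ee': 'Estonia', 'fi': 'Finland',
--     'se': 'Sweden', 'no': 'Norway', 'dk': 'Denmark', 'at': 'Austria',
--     'ch': 'Switzerland', 'be': 'Belgium', 'pt': 'Portugal', 'ro': 'Romania',
--     'bg': 'Bulgaria', 'hu': 'Hungary', 'sk': 'Slovakia', 'hr': 'Croatia',
--     'rs': 'Serbia', 'si': 'Slovenia', 'gr': 'Greece', 'ie': 'Ireland',
-- }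
--
-- KNOWN_DOMAINS = {
--     'bbc.com': 'UK', 'bbc.co.uk': 'UK', 'reuters.com': 'UK',
--     'nytimes.com': 'US', 'washingtonpost.com': 'US', 'cnn.com': 'US',
--     'theguardian.com': 'UK', 'ft.com': 'UK', 'telegraph.co.uk': 'UK',
--     'dw.com': 'Germany', 'aljazeera.com': 'Qatar', 'aljazeera.net': 'Qatar',
--     'france24.com': 'France', 'lemonde.fr': 'France',
--     'rt.com': 'Russia', 'sputniknews.com': 'Russia', 'ura.news': 'Russia',
--     'gazeta.ru': 'Russia', 'rbc.ru': 'Russia', 'meduza.io': 'Russia',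
--     'pravda.com.ua': 'Ukraine', 'kyivindependent.com': 'Ukraine',
--     'ukrinform.net': 'Ukraine', 'unian.net': 'Ukraine',
--     'globalsecurity.org': 'US', 'voanews.com': 'US',
-- }
--
-- def get_domain_country(domain: str) -> str:
--     domain = domain.lower().strip()
--     for known, country in KNOWN_DOMAINS.items():
--         if domain == known or domain.endswith('.' + known):
--             return country
--     parts = domain.rsplit('.', 2)
--     if len(parts) >= 2:
--         tld2 = '.'.join(parts[-2:])
--         if tld2 in TLD_COUNTRY:
--             return TLD_COUNTRY[tld2]
--     tld = parts[-1]
--     return TLD_COUNTRY.get(tld, '')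
-- ===== SOURCE B (Python) =====
-- TLD_COUNTRY = {
--     'ru': 'Russia', 'su': 'Russia', 'ua': 'Ukraine', 'by': 'Belarus',
--     'de': 'Germany', 'fr': 'France', 'it': 'Italy', 'es': 'Spain',
--     'uk': 'UK', 'co.uk': 'UK', 'pl': 'Poland', 'cz': 'Czechia',
--     'nl': 'Netherlands', 'tr': 'Turkey', 'cn': 'China', 'jp': 'Japan',
--     'kr': 'South Korea', 'in': 'India', 'br': 'Brazil', 'ae': 'UAE',
--     'il': 'Israel', 'ge': 'Georgia', 'kz': 'Kazakhstan', 'md': 'Moldova',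
--     'lv': 'Latvia', 'lt': 'Lithuania', 'ee': 'Estonia', 'fi': 'Finland',
--     'se': 'Sweden', 'no': 'Norway', 'dk': 'Denmark', 'at': 'Austria',
--     'ch': 'Switzerland', 'be': 'Belgium', 'pt': 'Portugal', 'ro': 'Romania',
--     'bg': 'Bulgaria', 'hu': 'Hungary', 'sk': 'Slovakia', 'hr': 'Croatia',
--     'rs': 'Serbia', 'si': 'Slovenia', 'gr': 'Greece', 'ie': 'Ireland',
-- }
--
-- KNOWN_DOMAINS = {
--     'bbc.com': 'UK', 'bbc.co.uk': 'UK', 'reuters.com': 'UK',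
--     'nytimes.com': 'US', 'washingtonpost.com': 'US', 'cnn.com': 'US',
--     'theguardian.com': 'UK', 'ft.com': 'UK', 'telegraph.co.uk': 'UK',
--     'dw.com': 'Germany', 'aljazeera.com': 'Qatar', 'aljazeera.net': 'Qatar',
--     'france24.com': 'France', 'lemonde.fr': 'France',
--     'rt.com': 'Russia', 'sputniknews.com': 'Russia', 'ura.news': 'Russia',
--     'gazeta.ru': 'Russia', 'rbc.ru': 'Russia', 'meduza.io': 'Russia',
--     'pravda.com.ua': 'Ukraine', 'kyivindependent.com': 'Ukraine',
--     'ukrinform.net': 'Ukraine', 'unian.net': 'Ukraine',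
--     'globalsecurity.org': 'US', 'voanews.com': 'US',
-- }
--
-- def get_domain_country(domain: str) -> str:
--     domain = domain.lower().strip()
--     parts = domain.split('.')
--     # walk the domain's own dotted suffixes, longest first, and look each up
--     # directly in KNOWN_DOMAINS (no key ends with a dot followed by another key,
--     # so the first hit found this way is the one a full key scan would find too)
--     for i in range(len(parts)):
--         hit = KNOWN_DOMAINS.get('.'.join(parts[i:]))
--         if hit is not None:
--             return hit
--     tail = parts[-2:]
--     tld2 = '.'.join(tail)
--     if tld2 in TLD_COUNTRY:
--         return TLD_COUNTRY[tld2]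
--     return TLD_COUNTRY.get(tail[-1], '')
-- ===== Notes on version B (the rewrite author's own statement) =====
-- stated objective: idiomatic
-- what changed: Instead of scanning every KNOWN_DOMAINS key with an endswith test, B splits the domain into its dot-separated labels and looks the domain's own dotted suffixes up directly in the dict (longest first), reading the TLD fallback off the last two labels of that same split instead of a separate rsplit.
import Mathlib
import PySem

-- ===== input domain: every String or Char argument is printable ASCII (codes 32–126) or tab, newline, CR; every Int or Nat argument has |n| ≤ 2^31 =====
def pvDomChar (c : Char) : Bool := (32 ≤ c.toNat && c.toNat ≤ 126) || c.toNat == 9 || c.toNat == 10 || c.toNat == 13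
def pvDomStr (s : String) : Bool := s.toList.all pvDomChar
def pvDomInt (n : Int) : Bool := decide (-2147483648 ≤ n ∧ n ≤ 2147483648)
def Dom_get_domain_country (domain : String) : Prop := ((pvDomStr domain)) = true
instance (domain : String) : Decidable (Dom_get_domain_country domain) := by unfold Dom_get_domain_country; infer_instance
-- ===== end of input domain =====

-- B replaces A's endswith-scan over all KNOWN_DOMAINS keys by direct dictionary lookups of the
-- domain's own dotted suffixes (longest first), reading the TLD fallback off the same split;
-- objective: idiomatic, not claimed faster.


-- ===== PORT A =====
-- A's module dicts, as insertion-order association lists over List Char (A iterates / gets on them)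
def pvTLD : List (List Char × List Char) := [
  ("ru".toList, "Russia".toList),
  ("su".toList, "Russia".toList),
  ("ua".toList, "Ukraine".toList),
  ("by".toList, "Belarus".toList),
  ("de".toList, "Germany".toList),
  ("fr".toList, "France".toList),
  ("it".toList, "Italy".toList),
  ("es".toList, "Spain".toList),
  ("uk".toList, "UK".toList),
  ("co.uk".toList, "UK".toList),
  ("pl".toList, "Poland".toList),
  ("cz".toList, "Czechia".toList),
  ("nl".toList, "Netherlands".toList),
  ("tr".toList, "Turkey".toList),
  ("cn".toList, "China".toList),
  ("jp".toList, "Japan".toList),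
  ("kr".toList, "South Korea".toList),
  ("in".toList, "India".toList),
  ("br".toList, "Brazil".toList),
  ("ae".toList, "UAE".toList),
  ("il".toList, "Israel".toList),
  ("ge".toList, "Georgia".toList),
  ("kz".toList, "Kazakhstan".toList),
  ("md".toList, "Moldova".toList),
  ("lv".toList, "Latvia".toList),
  ("lt".toList, "Lithuania".toList),
  ("ee".toList, "Estonia".toList),
  ("fi".toList, "Finland".toList),
  ("se".toList, "Sweden".toList),
  ("no".toList, "Norway".toList),
  ("dk".toList, "Denmark".toList),
  ("at".toList, "Austria".toList),
  ("ch".toList, "Switzerland".toList),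
  ("be".toList, "Belgium".toList),
  ("pt".toList, "Portugal".toList),
  ("ro".toList, "Romania".toList),
  ("bg".toList, "Bulgaria".toList),
  ("hu".toList, "Hungary".toList),
  ("sk".toList, "Slovakia".toList),
  ("hr".toList, "Croatia".toList),
  ("rs".toList, "Serbia".toList),
  ("si".toList, "Slovenia".toList),
  ("gr".toList, "Greece".toList),
  ("ie".toList, "Ireland".toList)]

def pvKNOWN : List (List Char × List Char) := [
  ("bbc.com".toList, "UK".toList),
  ("bbc.co.uk".toList, "UK".toList),
  ("reuters.com".toList, "UK".toList),
  ("nytimes.com".toList, "US".toList),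
  ("washingtonpost.com".toList, "US".toList),
  ("cnn.com".toList, "US".toList),
  ("theguardian.com".toList, "UK".toList),
  ("ft.com".toList, "UK".toList),
  ("telegraph.co.uk".toList, "UK".toList),
  ("dw.com".toList, "Germany".toList),
  ("aljazeera.com".toList, "Qatar".toList),
  ("aljazeera.net".toList, "Qatar".toList),
  ("france24.com".toList, "France".toList),
  ("lemonde.fr".toList, "France".toList),
  ("rt.com".toList, "Russia".toList),
  ("sputniknews.com".toList, "Russia".toList),
  ("ura.news".toList, "Russia".toList),
  ("gazeta.ru".toList, "Russia".toList),
  ("rbc.ru".toList, "Russia".toList),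
  ("meduza.io".toList, "Russia".toList),
  ("pravda.com.ua".toList, "Ukraine".toList),
  ("kyivindependent.com".toList, "Ukraine".toList),
  ("ukrinform.net".toList, "Ukraine".toList),
  ("unian.net".toList, "Ukraine".toList),
  ("globalsecurity.org".toList, "US".toList),
  ("voanews.com".toList, "US".toList)]

-- first-match association-list lookup: the port of d[k] / d.get(k) on A's dicts
def pvGet (l : List (List Char × List Char)) (s : List Char) : Option (List Char) :=
  match l with
  | [] => none
  | (k, v) :: rest => if s = k then some v else pvGet rest s

-- the 'for known, country in KNOWN_DOMAINS.items(): if domain == known or domain.endswith(...)' loop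
def pvScanA (l : List (List Char × List Char)) (d : List Char) : Option (List Char) :=
  match l with
  | [] => none
  | (k, c) :: rest =>
    if d == k || PySem.Chars.endswith d ('.' :: k) then some c else pvScanA rest d

-- hand port of cs.rsplit('.', 2) (PySem has no rsplit); exact for the single-char
-- separator '.': it keeps the last two '.'-fields and rejoins everything before them
def pvRsplit2 (cs : List Char) : List (List Char) :=
  let ps := PySem.Chars.splitOn cs ['.']
  if 3 < ps.length then PySem.Chars.join ['.'] (ps.take (ps.length - 2)) :: ps.drop (ps.length - 2) else ps

def get_domain_country (domain : String) : String :=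
  let d := PySem.Chars.strip (PySem.Chars.lower domain.toList)
  match pvScanA pvKNOWN d with
  | some c => String.ofList c
  | none =>
    let parts := pvRsplit2 d
    let viaTld2 : Option (List Char) :=
      if 2 ≤ parts.length then
        pvGet pvTLD (PySem.Chars.join ['.'] (PySem.List.slice parts (some (-2)) none))
      else none
    match viaTld2 with
    | some c => String.ofList c
    | none =>
      -- parts is never empty, so the .getD [] default after parts[-1] is unreachable
      String.ofList ((pvGet pvTLD ((PySem.List.pyGet? parts (-1)).getD [])).getD [])

-- ===== PORT B =====
-- Source B's KNOWN_DOMAINS.get(s): a direct String-keyed lookup, one equality test per key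
def knownB (s : String) : Option String :=
  if s = "bbc.com" then some "UK"
  else if s = "bbc.co.uk" then some "UK"
  else if s = "reuters.com" then some "UK"
  else if s = "nytimes.com" then some "US"
  else if s = "washingtonpost.com" then some "US"
  else if s = "cnn.com" then some "US"
  else if s = "theguardian.com" then some "UK"
  else if s = "ft.com" then some "UK"
  else if s = "telegraph.co.uk" then some "UK"
  else if s = "dw.com" then some "Germany"
  else if s = "aljazeera.com" then some "Qatar"
  else if s = "aljazeera.net" then some "Qatar"
  else if s = "france24.com" then some "France"
  else if s = "lemonde.fr" then some "France"
  else if s = "rt.com" then some "Russia"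
  else if s = "sputniknews.com" then some "Russia"
  else if s = "ura.news" then some "Russia"
  else if s = "gazeta.ru" then some "Russia"
  else if s = "rbc.ru" then some "Russia"
  else if s = "meduza.io" then some "Russia"
  else if s = "pravda.com.ua" then some "Ukraine"
  else if s = "kyivindependent.com" then some "Ukraine"
  else if s = "ukrinform.net" then some "Ukraine"
  else if s = "unian.net" then some "Ukraine"
  else if s = "globalsecurity.org" then some "US"
  else if s = "voanews.com" then some "US"
  else none

-- Source B's TLD_COUNTRY lookup, the same way
def tldB (s : String) : Option String :=
  if s = "ru" then some "Russia"
  else if s = "su" then some "Russia"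
  else if s = "ua" then some "Ukraine"
  else if s = "by" then some "Belarus"
  else if s = "de" then some "Germany"
  else if s = "fr" then some "France"
  else if s = "it" then some "Italy"
  else if s = "es" then some "Spain"
  else if s = "uk" then some "UK"
  else if s = "co.uk" then some "UK"
  else if s = "pl" then some "Poland"
  else if s = "cz" then some "Czechia"
  else if s = "nl" then some "Netherlands"
  else if s = "tr" then some "Turkey"
  else if s = "cn" then some "China"
  else if s = "jp" then some "Japan"
  else if s = "kr" then some "South Korea"
  else if s = "in" then some "India"
  else if s = "br" then some "Brazil"
  else if s = "ae" then some "UAE"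
  else if s = "il" then some "Israel"
  else if s = "ge" then some "Georgia"
  else if s = "kz" then some "Kazakhstan"
  else if s = "md" then some "Moldova"
  else if s = "lv" then some "Latvia"
  else if s = "lt" then some "Lithuania"
  else if s = "ee" then some "Estonia"
  else if s = "fi" then some "Finland"
  else if s = "se" then some "Sweden"
  else if s = "no" then some "Norway"
  else if s = "dk" then some "Denmark"
  else if s = "at" then some "Austria"
  else if s = "ch" then some "Switzerland"
  else if s = "be" then some "Belgium"
  else if s = "pt" then some "Portugal"
  else if s = "ro" then some "Romania"
  else if s = "bg" then some "Bulgaria"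
  else if s = "hu" then some "Hungary"
  else if s = "sk" then some "Slovakia"
  else if s = "hr" then some "Croatia"
  else if s = "rs" then some "Serbia"
  else if s = "si" then some "Slovenia"
  else if s = "gr" then some "Greece"
  else if s = "ie" then some "Ireland"
  else none

-- Source B's 'for i in range(len(parts)): hit = KNOWN_DOMAINS.get('.'.join(parts[i:]))'
def pvWalkB (ps : List (List Char)) : Option String :=
  match ps with
  | [] => none
  | p :: rest =>
    match knownB (String.ofList (PySem.Chars.join ['.'] (p :: rest))) with
    | some c => some c
    | none => pvWalkB rest

def get_domain_country_alt (domain : String) : String :=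
  let d := PySem.Chars.strip (PySem.Chars.lower domain.toList)
  let parts := PySem.Chars.splitOn d ['.']
  match pvWalkB parts with
  | some c => c
  | none =>
    let tail := PySem.List.slice parts (some (-2)) none
    match tldB (String.ofList (PySem.Chars.join ['.'] tail)) with
    | some c => c
    | none =>
      -- tail is never empty, so the .getD [] default after tail[-1] is unreachable
      (tldB (String.ofList ((PySem.List.pyGet? tail (-1)).getD []))).getD ""

-- ===== PRECONDITION & SPEC =====
def Spec_get_domain_country (domain : String) (out : String) : Prop := out = get_domain_country_alt domain
instance (domain : String) (out : String) : Decidable (Spec_get_domain_country domain out) := by unfold Spec_get_domain_country; infer_instance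

-- ===== CLAIM (what is proved, stated in full; the proofs are below) =====
def Claim_equal_get_domain_country : Prop := ∀ (domain : String), Dom_get_domain_country domain → Spec_get_domain_country domain (get_domain_country domain)

-- ===== LEMMAS AND PROOFS =====

-- clean structural recursion equal to PySem.Chars.splitOn · ['.']
def pvSplitOne : List Char → List (List Char)
  | [] => [[]]
  | c :: rest =>
    if c = '.' then [] :: pvSplitOne rest
    else
      match pvSplitOne rest with
      | [] => [[c]]
      | h :: t => (c :: h) :: t

theorem pvSplitOne_ne_nil (cs : List Char) : pvSplitOne cs ≠ [] := by
  cases cs with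
  | nil => simp [pvSplitOne]
  | cons c rest =>
    simp only [pvSplitOne]
    split
    · simp
    · split <;> simp

theorem pvSplitOne_dot (rest : List Char) : pvSplitOne ('.' :: rest) = [] :: pvSplitOne rest := by
  simp [pvSplitOne]

theorem pvSplitOne_ndot (c : Char) (rest : List Char) (hc : c ≠ '.') (h0 : List Char)
    (t : List (List Char)) (hsr : pvSplitOne rest = h0 :: t) :
    pvSplitOne (c :: rest) = (c :: h0) :: t := by
  simp [pvSplitOne, hc, hsr]

theorem pvGo_spec (fuel : Nat) (l cur : List Char) (acc : List (List Char)) (h : l.length ≤ fuel) :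
    PySem.Chars.splitOn.go ['.'] fuel l cur acc =
      acc.reverse ++ (match pvSplitOne l with
        | [] => []
        | h :: t => (cur.reverse ++ h) :: t) := by
  induction fuel generalizing l cur acc with
  | zero =>
    have : l = [] := by cases l <;> simp_all
    subst this
    simp [PySem.Chars.splitOn.go, pvSplitOne]
  | succ fuel ih =>
    cases l with
    | nil => simp [PySem.Chars.splitOn.go, pvSplitOne]
    | cons c rest =>
      simp only [PySem.Chars.splitOn.go]
      by_cases hc : c = '.'
      · subst hc
        have hp : List.isPrefixOf ['.'] ('.' :: rest) = true := by simp [List.isPrefixOf]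
        rw [if_pos hp]
        simp only [List.length, List.drop]
        rw [ih rest [] ((cur.reverse) :: acc) (by simpa using Nat.lt_succ_iff.mp (by simpa using h))]
        simp [pvSplitOne]
        cases hs : pvSplitOne rest with
        | nil => exact absurd hs (pvSplitOne_ne_nil rest)
        | cons h t => simp
      · have hp : List.isPrefixOf ['.'] (c :: rest) = false := by
          simp [List.isPrefixOf]; exact fun hh => absurd hh.symm hc
        rw [if_neg (by simp [hp])]
        rw [ih rest (c :: cur) acc (by simpa using Nat.lt_succ_iff.mp (by simpa using h))]
        simp only [pvSplitOne, if_neg hc]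
        cases hs : pvSplitOne rest with
        | nil => exact absurd hs (pvSplitOne_ne_nil rest)
        | cons h t => simp

theorem pvSplitOn_eq (cs : List Char) : PySem.Chars.splitOn cs ['.'] = pvSplitOne cs := by
  unfold PySem.Chars.splitOn
  rw [pvGo_spec (cs.length + 1) cs [] [] (by omega)]
  cases hs : pvSplitOne cs with
  | nil => exact absurd hs (pvSplitOne_ne_nil cs)
  | cons h t => simp

theorem join_cons (p : List Char) (t : List (List Char)) (ht : t ≠ []) :
    PySem.Chars.join ['.'] (p :: t) = p ++ '.' :: PySem.Chars.join ['.'] t := by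
  cases t with
  | nil => exact absurd rfl ht
  | cons q r => rw [PySem.Chars.join_cons_cons]; simp

theorem pvJoin_splitOne (cs : List Char) : PySem.Chars.join ['.'] (pvSplitOne cs) = cs := by
  induction cs with
  | nil => simp [pvSplitOne, PySem.Chars.join_singleton]
  | cons c rest ih =>
    by_cases hc : c = '.'
    · subst hc
      rw [pvSplitOne_dot, join_cons [] (pvSplitOne rest) (pvSplitOne_ne_nil rest)]
      simp [ih]
    · cases hsr : pvSplitOne rest with
      | nil => exact absurd hsr (pvSplitOne_ne_nil rest)
      | cons h0 t =>
        rw [pvSplitOne_ndot c rest hc h0 t hsr]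
        rw [hsr] at ih
        cases t with
        | nil => simp [PySem.Chars.join_singleton] at ih ⊢; exact ih
        | cons q r =>
          rw [PySem.Chars.join_cons_cons] at ih ⊢
          simpa using ih

theorem pvJoin_len_le (ps' ps : List (List Char)) (hs : ps' <:+ ps) (hne : ps' ≠ []) :
    (PySem.Chars.join ['.'] ps').length ≤ (PySem.Chars.join ['.'] ps).length := by
  induction ps with
  | nil => simp_all [List.suffix_nil]
  | cons p t ih =>
    rcases List.suffix_cons_iff.mp hs with h | h
    · subst h; exact le_refl _
    · have ht : t ≠ [] := by rintro rfl; simp [List.suffix_nil] at h; exact hne h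
      calc (PySem.Chars.join ['.'] ps').length ≤ (PySem.Chars.join ['.'] t).length := ih h
        _ ≤ _ := by rw [join_cons p t ht]; simp; omega

theorem pvJoin_len_lt (ps' ps : List (List Char)) (hs : ps' <:+ ps) (hp : ps' ≠ ps) (hne : ps' ≠ []) :
    (PySem.Chars.join ['.'] ps').length < (PySem.Chars.join ['.'] ps).length := by
  cases ps with
  | nil => simp_all [List.suffix_nil]
  | cons p t =>
    rcases List.suffix_cons_iff.mp hs with h | h
    · exact absurd h hp
    · have ht : t ≠ [] := by rintro rfl; simp [List.suffix_nil] at h; exact hne h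
      have := pvJoin_len_le ps' t h hne
      rw [join_cons p t ht]; simp; omega

theorem pvSuffix_join_inj (ps₁ ps₂ ps : List (List Char)) (h₁ : ps₁ <:+ ps) (h₂ : ps₂ <:+ ps)
    (n₁ : ps₁ ≠ []) (n₂ : ps₂ ≠ [])
    (hj : PySem.Chars.join ['.'] ps₁ = PySem.Chars.join ['.'] ps₂) : ps₁ = ps₂ := by
  by_contra hne
  rcases List.suffix_or_suffix_of_suffix h₁ h₂ with h | h
  · have := pvJoin_len_lt ps₁ ps₂ h hne n₁; rw [hj] at this; omega
  · have := pvJoin_len_lt ps₂ ps₁ h (Ne.symm hne) n₂; rw [hj] at this; omega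

theorem pvDotSuffix_iff (cs k : List Char) :
    ('.' :: k) <:+ cs ↔
      ∃ ps', ps' ≠ [] ∧ ps' <:+ pvSplitOne cs ∧ ps' ≠ pvSplitOne cs ∧ PySem.Chars.join ['.'] ps' = k := by
  induction cs generalizing k with
  | nil =>
    simp only [List.suffix_nil]
    constructor
    · intro h; simp at h
    · rintro ⟨ps', hne, hs, hp, hj⟩
      simp [pvSplitOne] at hs hp
      rcases List.suffix_cons_iff.mp hs with h | h
      · exact absurd h hp
      · simp [List.suffix_nil] at h; exact absurd h hne
  | cons c rest ih =>
    by_cases hc : c = '.'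
    · subst hc
      rw [pvSplitOne_dot]
      constructor
      · intro h
        rcases List.suffix_cons_iff.mp h with h | h
        · have hk : k = rest := by simpa using h
          rw [hk]
          exact ⟨pvSplitOne rest, pvSplitOne_ne_nil rest, List.suffix_cons _ _,
            by intro hh; have := congrArg List.length hh; simp at this,
            pvJoin_splitOne rest⟩
        · rcases (ih k).mp h with ⟨ps', hne, hs, hp, hj⟩
          refine ⟨ps', hne, hs.trans (List.suffix_cons _ _), ?_, hj⟩
          intro hh; rw [hh] at hs
          have := List.IsSuffix.length_le hs; simp at this
      · rintro ⟨ps', hne, hs, hp, hj⟩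
        rcases List.suffix_cons_iff.mp hs with h | h
        · exact absurd h hp
        · by_cases hw : ps' = pvSplitOne rest
          · subst hw
            rw [pvJoin_splitOne rest] at hj
            rw [← hj]
          · exact ((ih k).mpr ⟨ps', hne, h, hw, hj⟩).trans (List.suffix_cons _ _)
    · cases hsr : pvSplitOne rest with
      | nil => exact absurd hsr (pvSplitOne_ne_nil rest)
      | cons h0 t =>
        rw [pvSplitOne_ndot c rest hc h0 t hsr]
        constructor
        · intro h
          rcases List.suffix_cons_iff.mp h with h | h
          · exfalso; apply hc; injection h with h1 h2; exact h1.symm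
          · rcases (ih k).mp h with ⟨ps', hne, hs, hp, hj⟩
            rw [hsr] at hs hp
            rcases List.suffix_cons_iff.mp hs with hh | hh
            · exact absurd hh hp
            · refine ⟨ps', hne, hh.trans (List.suffix_cons (c :: h0) t), ?_, hj⟩
              intro hx
              have := List.IsSuffix.length_le hh
              rw [hx] at this; simp at this
        · rintro ⟨ps', hne, hs, hp, hj⟩
          rcases List.suffix_cons_iff.mp hs with h | h
          · exact absurd h hp
          · have hps : ps' <:+ pvSplitOne rest := by rw [hsr]; exact h.trans (List.suffix_cons h0 t)
            have hnp : ps' ≠ pvSplitOne rest := by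
              intro hx; rw [hsr] at hx; rw [hx] at h
              have := List.IsSuffix.length_le h; simp at this
            exact ((ih k).mpr ⟨ps', hne, hps, hnp, hj⟩).trans (List.suffix_cons c rest)

theorem pvMatches_iff (cs k : List Char) :
    (cs = k ∨ ('.' :: k) <:+ cs) ↔
      ∃ ps', ps' ≠ [] ∧ ps' <:+ pvSplitOne cs ∧ PySem.Chars.join ['.'] ps' = k := by
  constructor
  · rintro (rfl | h)
    · exact ⟨pvSplitOne cs, pvSplitOne_ne_nil cs, List.suffix_refl _, pvJoin_splitOne cs⟩
    · rcases (pvDotSuffix_iff cs k).mp h with ⟨ps', hne, hs, _, hj⟩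
      exact ⟨ps', hne, hs, hj⟩
  · rintro ⟨ps', hne, hs, hj⟩
    by_cases hw : ps' = pvSplitOne cs
    · subst hw; rw [pvJoin_splitOne cs] at hj; exact Or.inl hj
    · exact Or.inr ((pvDotSuffix_iff cs k).mpr ⟨ps', hne, hs, hw, hj⟩)

theorem pvGet_eq_none_iff (l : List (List Char × List Char)) (s : List Char) :
    pvGet l s = none ↔ ∀ kv ∈ l, s ≠ kv.1 := by
  induction l with
  | nil => simp [pvGet]
  | cons kv rest ih =>
    obtain ⟨k, v⟩ := kv
    simp only [pvGet]
    split_ifs with h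
    · simp [h]
    · simp [ih, h]

theorem pvGet_isSome_iff (l : List (List Char × List Char)) (s : List Char) :
    (pvGet l s).isSome = true ↔ ∃ kv ∈ l, s = kv.1 := by
  induction l with
  | nil => simp [pvGet]
  | cons kv rest ih =>
    obtain ⟨k, v⟩ := kv
    simp only [pvGet]
    split_ifs with h
    · simp [h]
    · simp only [List.mem_cons, ih]
      constructor
      · rintro ⟨kv', hm, he⟩; exact ⟨kv', Or.inr hm, he⟩
      · rintro ⟨kv', (rfl | hm), he⟩
        · exact absurd he h
        · exact ⟨kv', hm, he⟩

-- no KNOWN_DOMAINS key ends with '.'+another key (checked over all pairs)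
theorem pvPairs : ∀ kv1 ∈ pvKNOWN, ∀ kv2 ∈ pvKNOWN, PySem.Chars.endswith kv1.1 ('.' :: kv2.1) = false := by
  decide

theorem pvUniq (cs : List Char) (k1 k2 : List Char)
    (h1 : k1 ∈ pvKNOWN.map Prod.fst) (h2 : k2 ∈ pvKNOWN.map Prod.fst)
    (m1 : cs = k1 ∨ ('.' :: k1) <:+ cs) (m2 : cs = k2 ∨ ('.' :: k2) <:+ cs) : k1 = k2 := by
  rcases List.mem_map.mp h1 with ⟨kv1, hkv1, he1⟩
  rcases List.mem_map.mp h2 with ⟨kv2, hkv2, he2⟩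
  have pair12 : ¬ (('.' :: k2) <:+ k1) := by
    have := pvPairs kv1 hkv1 kv2 hkv2
    rw [he1, he2] at this
    intro hsuf
    rw [show PySem.Chars.endswith k1 ('.' :: k2) = true from by
      simp [PySem.Chars.endswith, List.isSuffixOf_iff_suffix, hsuf]] at this
    exact absurd this (by simp)
  have pair21 : ¬ (('.' :: k1) <:+ k2) := by
    have := pvPairs kv2 hkv2 kv1 hkv1
    rw [he1, he2] at this
    intro hsuf
    rw [show PySem.Chars.endswith k2 ('.' :: k1) = true from by
      simp [PySem.Chars.endswith, List.isSuffixOf_iff_suffix, hsuf]] at this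
    exact absurd this (by simp)
  rcases m1 with rfl | s1
  · rcases m2 with rfl | s2
    · rfl
    · exact absurd s2 pair12
  · rcases m2 with rfl | s2
    · exact absurd s1 pair21
    · rcases List.suffix_or_suffix_of_suffix s1 s2 with h | h
      · rcases List.suffix_cons_iff.mp h with h | h
        · exact (by injection h : k1 = k2)
        · exact absurd h pair21
      · rcases List.suffix_cons_iff.mp h with h | h
        · exact (by injection h with h1 h2; exact h2.symm : k1 = k2)
        · exact absurd h pair12

theorem pvScanA_none_iff (l : List (List Char × List Char)) (cs : List Char) :
    pvScanA l cs = none ↔ ∀ kv ∈ l, ¬(cs = kv.1 ∨ ('.' :: kv.1) <:+ cs) := by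
  induction l with
  | nil => simp [pvScanA]
  | cons kv rest ih =>
    obtain ⟨k, c⟩ := kv
    simp only [pvScanA]
    by_cases h : cs = k ∨ ('.' :: k) <:+ cs
    · rw [if_pos (by
        rcases h with h | h
        · simp [h]
        · simp [PySem.Chars.endswith, List.isSuffixOf_iff_suffix, h])]
      simp only [List.mem_cons]
      constructor
      · intro hc; exact absurd hc (by simp)
      · intro hall; exact absurd h (hall (k, c) (Or.inl rfl))
    · rw [if_neg (by
        push_neg at h
        simp [PySem.Chars.endswith, List.isSuffixOf_iff_suffix, h.1, h.2])]
      simp only [List.mem_cons, ih]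
      constructor
      · rintro hall kv' (rfl | hm)
        · exact h
        · exact hall kv' hm
      · intro hall kv' hm; exact hall kv' (Or.inr hm)

theorem pvScanA_eq_pvGet (l : List (List Char × List Char)) (cs k : List Char)
    (hm : cs = k ∨ ('.' :: k) <:+ cs)
    (hu : ∀ kv ∈ l, (cs = kv.1 ∨ ('.' :: kv.1) <:+ cs) → kv.1 = k) :
    pvScanA l cs = pvGet l k := by
  induction l with
  | nil => simp [pvScanA, pvGet]
  | cons kv rest ih =>
    obtain ⟨k', c'⟩ := kv
    simp only [pvScanA, pvGet]
    by_cases h : cs = k' ∨ ('.' :: k') <:+ cs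
    · have hk : k' = k := hu (k', c') (by simp) h
      rw [if_pos (by
        rcases h with h | h
        · simp [h]
        · simp [PySem.Chars.endswith, List.isSuffixOf_iff_suffix, h]), if_pos hk.symm]
    · have hk : ¬ (k = k') := by
        rintro rfl
        exact h hm
      rw [if_neg (by
        push_neg at h
        simp [PySem.Chars.endswith, List.isSuffixOf_iff_suffix, h.1, h.2]), if_neg hk]
      exact ih (fun kv' hm' h' => hu kv' (by simp [hm']) h')

-- proof-side abstraction of B's walk, over List Char (related to pvWalkB by pvWalkB_eq)
def pvWalk' (ps : List (List Char)) : Option (List Char) :=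
  match ps with
  | [] => none
  | p :: rest =>
    match pvGet pvKNOWN (PySem.Chars.join ['.'] (p :: rest)) with
    | some c => some c
    | none => pvWalk' rest

-- B's String-keyed tables agree with A's association lists
-- generic if-chain lookup over String pairs; knownB / tldB are definitionally
-- pvChain applied to their tables, which lets the bridge lemmas go by induction
def pvChain (l : List (String × String)) (s : String) : Option String :=
  match l with
  | [] => none
  | (k, v) :: rest => if s = k then some v else pvChain rest s

theorem pvOfList_inj (a b : List Char) : (String.ofList a = String.ofList b) ↔ a = b := by
  constructor
  · intro h
    have := congrArg String.toList h
    simpa using this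
  · rintro rfl; rfl

theorem pvChain_map (l : List (List Char × List Char)) (cs : List Char) :
    pvChain (l.map fun kv => (String.ofList kv.1, String.ofList kv.2)) (String.ofList cs) =
      (pvGet l cs).map String.ofList := by
  induction l with
  | nil => rfl
  | cons kv rest ih =>
    obtain ⟨k, v⟩ := kv
    simp only [List.map, pvChain, pvGet, pvOfList_inj]
    split_ifs with h
    · rfl
    · exact ih

theorem pvKNOWN_map : pvKNOWN.map (fun kv => (String.ofList kv.1, String.ofList kv.2)) =
    [("bbc.com", "UK"), ("bbc.co.uk", "UK"), ("reuters.com", "UK"), ("nytimes.com", "US"),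
     ("washingtonpost.com", "US"), ("cnn.com", "US"), ("theguardian.com", "UK"), ("ft.com", "UK"),
     ("telegraph.co.uk", "UK"), ("dw.com", "Germany"), ("aljazeera.com", "Qatar"),
     ("aljazeera.net", "Qatar"), ("france24.com", "France"), ("lemonde.fr", "France"),
     ("rt.com", "Russia"), ("sputniknews.com", "Russia"), ("ura.news", "Russia"),
     ("gazeta.ru", "Russia"), ("rbc.ru", "Russia"), ("meduza.io", "Russia"),
     ("pravda.com.ua", "Ukraine"), ("kyivindependent.com", "Ukraine"), ("ukrinform.net", "Ukraine"),
     ("unian.net", "Ukraine"), ("globalsecurity.org", "US"), ("voanews.com", "US")] := by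
  simp [pvKNOWN]

theorem pvTLD_map : pvTLD.map (fun kv => (String.ofList kv.1, String.ofList kv.2)) =
    [("ru", "Russia"), ("su", "Russia"), ("ua", "Ukraine"), ("by", "Belarus"), ("de", "Germany"),
     ("fr", "France"), ("it", "Italy"), ("es", "Spain"), ("uk", "UK"), ("co.uk", "UK"),
     ("pl", "Poland"), ("cz", "Czechia"), ("nl", "Netherlands"), ("tr", "Turkey"), ("cn", "China"),
     ("jp", "Japan"), ("kr", "South Korea"), ("in", "India"), ("br", "Brazil"), ("ae", "UAE"),
     ("il", "Israel"), ("ge", "Georgia"), ("kz", "Kazakhstan"), ("md", "Moldova"), ("lv", "Latvia"),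
     ("lt", "Lithuania"), ("ee", "Estonia"), ("fi", "Finland"), ("se", "Sweden"), ("no", "Norway"),
     ("dk", "Denmark"), ("at", "Austria"), ("ch", "Switzerland"), ("be", "Belgium"),
     ("pt", "Portugal"), ("ro", "Romania"), ("bg", "Bulgaria"), ("hu", "Hungary"),
     ("sk", "Slovakia"), ("hr", "Croatia"), ("rs", "Serbia"), ("si", "Slovenia"), ("gr", "Greece"),
     ("ie", "Ireland")] := by
  simp [pvTLD]

theorem knownB_eq (cs : List Char) :
    knownB (String.ofList cs) = (pvGet pvKNOWN cs).map String.ofList := by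
  have h : knownB (String.ofList cs) =
      pvChain (pvKNOWN.map fun kv => (String.ofList kv.1, String.ofList kv.2)) (String.ofList cs) := by
    rw [pvKNOWN_map]; rfl
  rw [h, pvChain_map]

theorem tldB_eq (cs : List Char) :
    tldB (String.ofList cs) = (pvGet pvTLD cs).map String.ofList := by
  have h : tldB (String.ofList cs) =
      pvChain (pvTLD.map fun kv => (String.ofList kv.1, String.ofList kv.2)) (String.ofList cs) := by
    rw [pvTLD_map]; rfl
  rw [h, pvChain_map]

theorem pvWalkB_eq (ps : List (List Char)) :
    pvWalkB ps = (pvWalk' ps).map String.ofList := by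
  induction ps with
  | nil => rfl
  | cons p rest ih =>
    simp only [pvWalkB, pvWalk', knownB_eq]
    cases pvGet pvKNOWN (PySem.Chars.join ['.'] (p :: rest)) with
    | some c => rfl
    | none => simpa using ih

theorem pvWalk'_none_iff (ps : List (List Char)) :
    pvWalk' ps = none ↔ ∀ ps', ps' ≠ [] → ps' <:+ ps → pvGet pvKNOWN (PySem.Chars.join ['.'] ps') = none := by
  induction ps with
  | nil =>
    simp only [pvWalk', true_iff]
    intro ps' hne hs
    exact absurd (List.suffix_nil.mp hs) hne
  | cons p rest ih =>
    simp only [pvWalk']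
    cases hg : pvGet pvKNOWN (PySem.Chars.join ['.'] (p :: rest)) with
    | some c =>
      simp only []
      constructor
      · intro h; exact absurd h (by simp)
      · intro hall
        have := hall (p :: rest) (by simp) (List.suffix_refl _)
        rw [hg] at this; exact absurd this (by simp)
    | none =>
      simp only [ih]
      constructor
      · intro hall ps' hne hs
        rcases List.suffix_cons_iff.mp hs with rfl | hs
        · exact hg
        · exact hall ps' hne hs
      · intro hall ps' hne hs
        exact hall ps' hne (hs.trans (List.suffix_cons p rest))

theorem pvWalk'_eq_some (ps ps₀ : List (List Char)) (c : List Char)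
    (hne : ps₀ ≠ []) (hs : ps₀ <:+ ps) (hg : pvGet pvKNOWN (PySem.Chars.join ['.'] ps₀) = some c)
    (hu : ∀ ps₁, ps₁ ≠ [] → ps₁ <:+ ps → (pvGet pvKNOWN (PySem.Chars.join ['.'] ps₁)).isSome = true → ps₁ = ps₀) :
    pvWalk' ps = some c := by
  induction ps with
  | nil => exact absurd (List.suffix_nil.mp hs) hne
  | cons p rest ih =>
    simp only [pvWalk']
    cases hg' : pvGet pvKNOWN (PySem.Chars.join ['.'] (p :: rest)) with
    | some c' =>
      have : (p :: rest) = ps₀ :=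
        hu (p :: rest) (by simp) (List.suffix_refl _) (by simp [hg'])
      rw [this, hg] at hg'
      simpa using hg'.symm
    | none =>
      have hps : ps₀ <:+ rest := by
        rcases List.suffix_cons_iff.mp hs with rfl | h
        · rw [hg] at hg'; exact absurd hg' (by simp)
        · exact h
      exact ih hps (fun ps₁ hne₁ hs₁ hsome =>
        hu ps₁ hne₁ (hs₁.trans (List.suffix_cons p rest)) hsome)

theorem pvScan_eq_walk (cs : List Char) : pvScanA pvKNOWN cs = pvWalk' (pvSplitOne cs) := by
  by_cases hex : ∃ kv ∈ pvKNOWN, (cs = kv.1 ∨ ('.' :: kv.1) <:+ cs)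
  · rcases hex with ⟨⟨k, v⟩, hmem, hm⟩
    have huk : ∀ kv ∈ pvKNOWN, (cs = kv.1 ∨ ('.' :: kv.1) <:+ cs) → kv.1 = k := by
      intro kv' hm' h'
      exact pvUniq cs kv'.1 k (List.mem_map.mpr ⟨kv', hm', rfl⟩)
        (List.mem_map.mpr ⟨(k, v), hmem, rfl⟩) h' hm
    rw [pvScanA_eq_pvGet pvKNOWN cs k hm huk]
    cases hg : pvGet pvKNOWN k with
    | none =>
      exact absurd ((pvGet_eq_none_iff pvKNOWN k).mp hg (k, v) hmem) (by simp)
    | some c =>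
      rcases (pvMatches_iff cs k).mp hm with ⟨ps₀, hne₀, hs₀, hj₀⟩
      rw [(pvWalk'_eq_some (pvSplitOne cs) ps₀ c hne₀ hs₀ (by rw [hj₀]; exact hg)
        (fun ps₁ hne₁ hs₁ hsome => ?_))]
      rcases (pvGet_isSome_iff pvKNOWN (PySem.Chars.join ['.'] ps₁)).mp hsome with ⟨kv₁, hmem₁, he₁⟩
      have hm₁ : cs = kv₁.1 ∨ ('.' :: kv₁.1) <:+ cs :=
        (pvMatches_iff cs kv₁.1).mpr ⟨ps₁, hne₁, hs₁, he₁⟩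
      have : kv₁.1 = k := huk kv₁ hmem₁ hm₁
      apply pvSuffix_join_inj ps₁ ps₀ (pvSplitOne cs) hs₁ hs₀ hne₁ hne₀
      rw [he₁, this, hj₀]
  · have hex' : ∀ kv ∈ pvKNOWN, ¬(cs = kv.1 ∨ ('.' :: kv.1) <:+ cs) :=
      fun kv hm h => hex ⟨kv, hm, h⟩
    rw [(pvScanA_none_iff pvKNOWN cs).mpr hex']
    rw [(pvWalk'_none_iff (pvSplitOne cs)).mpr ?_]
    intro ps' hne hs
    rw [pvGet_eq_none_iff]
    intro kv hm he
    exact hex' kv hm ((pvMatches_iff cs kv.1).mpr ⟨ps', hne, hs, he⟩)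

theorem pvFallback_core (P ps : List (List Char)) (hne : ps ≠ [])
    (hP : P = if 3 < ps.length then PySem.Chars.join ['.'] (ps.take (ps.length - 2)) :: ps.drop (ps.length - 2) else ps) :
    (match (if 2 ≤ P.length then
              pvGet pvTLD (PySem.Chars.join ['.'] (PySem.List.slice P (some (-2)) none))
            else none) with
     | some c => String.ofList c
     | none => String.ofList ((pvGet pvTLD ((PySem.List.pyGet? P (-1)).getD [])).getD [])) =
    (match pvGet pvTLD (PySem.Chars.join ['.'] (PySem.List.slice ps (some (-2)) none)) with
     | some c => String.ofList c
     | none => String.ofList ((pvGet pvTLD ((PySem.List.pyGet? (PySem.List.slice ps (some (-2)) none) (-1)).getD [])).getD [])) := by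
  match ps, hne with
  | [x], _ =>
    rw [if_neg (by simp) ] at hP
    subst hP
    rw [if_neg (by simp)]
    rw [PySem.List.slice_from_neg_ofNat [x] 2 (by omega)]
    simp only [List.length_cons, List.length_nil, List.drop]
    rw [PySem.List.pyGet?_neg_one]
    simp only [List.getLast?_singleton, Option.getD_some, PySem.Chars.join_singleton]
    cases hg : pvGet pvTLD x with
    | some c => simp
    | none => simp
  | x :: y :: t, _ =>
    rw [PySem.List.slice_from_neg_ofNat (x :: y :: t) 2 (by omega)]
    by_cases h3 : 3 < (x :: y :: t).length
    · rw [if_pos h3] at hP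
      have h2 : 2 ≤ t.length := by simpa using h3
      have hdlen : ((x :: y :: t).drop ((x :: y :: t).length - 2)).length = 2 := by
        rw [List.length_drop]; simp; omega
      rcases List.length_eq_two.mp hdlen with ⟨d1, d2, hdd⟩
      rw [hdd] at hP
      subst hP
      rw [if_pos (by simp)]
      rw [PySem.List.slice_from_neg_ofNat _ 2 (by omega)]
      simp only [List.length_cons, List.length_nil]
      rw [show (2+1:Nat) - 2 = 1 from by omega]
      simp only [List.drop]
      simp only [List.length_cons] at hdd
      rw [hdd]
      cases hg : pvGet pvTLD (PySem.Chars.join ['.'] [d1, d2]) with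
      | some c => simp
      | none =>
        rw [PySem.List.pyGet?_neg_one, PySem.List.pyGet?_neg_one]
        simp
    · rw [if_neg h3] at hP
      subst hP
      rw [if_pos (by simp)]
      rw [PySem.List.slice_from_neg_ofNat (x :: y :: t) 2 (by omega)]
      cases t with
      | nil => simp
      | cons z t2 =>
        have ht2 : t2 = [] := by
          simp only [List.length_cons] at h3
          exact List.length_eq_zero_iff.mp (by omega)
        subst ht2
        simp only [List.length_cons, List.length_nil]
        rw [show (0+1+1+1:Nat) - 2 = 1 from by omega]
        simp only [List.drop]
        cases hg : pvGet pvTLD (PySem.Chars.join ['.'] [y, z]) with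
        | some c => simp
        | none =>
          rw [PySem.List.pyGet?_neg_one, PySem.List.pyGet?_neg_one]
          simp


-- ===== VERDICT (by name: the statement is the Claim_ definition above) =====
theorem get_domain_country_spec : Claim_equal_get_domain_country := by
  intro domain _
  unfold Spec_get_domain_country get_domain_country get_domain_country_alt pvRsplit2
  simp only [pvSplitOn_eq, pvScan_eq_walk, pvWalkB_eq]
  cases hw : pvWalk' (pvSplitOne (PySem.Chars.strip (PySem.Chars.lower domain.toList))) with
  | some c => rfl
  | none =>
    refine (pvFallback_core _ (pvSplitOne (PySem.Chars.strip (PySem.Chars.lower domain.toList)))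
      (pvSplitOne_ne_nil _) rfl).trans ?_
    simp only [tldB_eq]
    cases pvGet pvTLD (PySem.Chars.join ['.'] (PySem.List.slice (pvSplitOne (PySem.Chars.strip (PySem.Chars.lower domain.toList))) (some (-2)) none)) with
    | some c => rfl
    | none =>
      cases pvGet pvTLD ((PySem.List.pyGet? (PySem.List.slice (pvSplitOne (PySem.Chars.strip (PySem.Chars.lower domain.toList))) (some (-2)) none) (-1)).getD []) with
      | some c => rfl
      | none => rfl
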